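-- pv_equiv track=rewrite | github.com/PinoEdu/INF-129 | Preparacion-C1/C1_2021_1/p3-lab.py | votos_partido
-- ===== SOURCE A (Python) =====
-- def votos_partido(votos, partido):
--     contador = 0
--     auxiliar = ""
--     for caracter in votos:
--         if caracter != "$":
--             auxiliar += caracter
--         else:
--             if auxiliar == partido:
--                 contador += 1
--             auxiliar = ""
--     if auxiliar == partido:
--         contador += 1
--     return contador
-- ===== SOURCE B (Python) =====
-- def votos_partido(votos, partido):
--     return votos.split("$").count(partido)
-- ===== Notes on version B (the rewrite author's own statement) =====
-- stated objective: idiomatic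
-- what changed: Replaces the manual character-accumulation loop (building each token char by char and comparing at every delimiter) with a single split-then-count: votos.split("$").count(partido).
import Mathlib
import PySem

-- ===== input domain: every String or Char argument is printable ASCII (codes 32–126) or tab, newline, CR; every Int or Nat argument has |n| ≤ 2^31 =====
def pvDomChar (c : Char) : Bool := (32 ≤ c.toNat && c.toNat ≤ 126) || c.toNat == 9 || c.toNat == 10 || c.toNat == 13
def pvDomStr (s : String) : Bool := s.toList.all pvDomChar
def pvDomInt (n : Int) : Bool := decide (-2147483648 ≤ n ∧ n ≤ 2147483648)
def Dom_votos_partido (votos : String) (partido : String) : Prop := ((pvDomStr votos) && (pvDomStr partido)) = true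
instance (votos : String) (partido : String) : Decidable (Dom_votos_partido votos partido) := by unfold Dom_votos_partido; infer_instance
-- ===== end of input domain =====

-- B replaces A's manual character-accumulation loop with an idiomatic split-then-count
-- (votos.split("$").count(partido)); equivalence is proved for all inputs.


-- ===== PORT A =====
-- literal transliteration of A: fold over the characters keeping (contador, auxiliar)
def votos_partido (votos : String) (partido : String) : Int :=
  let r := votos.toList.foldl
    (fun (st : Int × List Char) caracter =>
      if caracter ≠ '$' then (st.1, st.2 ++ [caracter])
      else (if st.2 = partido.toList then st.1 + 1 else st.1, []))
    (0, [])
  if r.2 = partido.toList then r.1 + 1 else r.1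

-- ===== PORT B =====
-- Source B: votos.split("$").count(partido); "$" is nonempty so split? is always `some`
def votos_partido_alt (votos : String) (partido : String) : Int :=
  (((PySem.Str.split? votos "$").getD []).count partido : Int)

-- ===== PRECONDITION & SPEC =====
def Spec_votos_partido (votos : String) (partido : String) (out : Int) : Prop := out = votos_partido_alt votos partido
instance (votos : String) (partido : String) (out : Int) : Decidable (Spec_votos_partido votos partido out) := by unfold Spec_votos_partido; infer_instance

-- ===== CLAIM (what is proved, stated in full; the proofs are below) =====
def Claim_equal_votos_partido : Prop := ∀ (votos : String) (partido : String), Dom_votos_partido votos partido → Spec_votos_partido votos partido (votos_partido votos partido)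

-- ===== LEMMAS AND PROOFS =====

-- the loop body of port A, named for the proofs
def pvStep (P : List Char) : Int × List Char → Char → Int × List Char :=
  fun st c =>
    if c ≠ '$' then (st.1, st.2 ++ [c])
    else (if st.2 = P then st.1 + 1 else st.1, [])

-- simple structural recursion equivalent to splitOn on the single-char separator '$'
def pvSplit : List Char → List Char → List (List Char)
  | [], cur => [cur.reverse]
  | c :: rest, cur => if c = '$' then cur.reverse :: pvSplit rest [] else pvSplit rest (c :: cur)

theorem pv_go_eq : ∀ (l : List Char) (fuel : Nat) (cur : List Char) (acc : List (List Char)),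
    l.length < fuel →
    PySem.Chars.splitOn.go ['$'] fuel l cur acc = acc.reverse ++ pvSplit l cur := by
  intro l
  induction l with
  | nil =>
    intro fuel cur acc h
    cases fuel with
    | zero => omega
    | succ f => simp [PySem.Chars.splitOn.go, pvSplit]
  | cons c rest ih =>
    intro fuel cur acc h
    cases fuel with
    | zero => omega
    | succ f =>
      by_cases hc : c = '$'
      · subst hc
        rw [show PySem.Chars.splitOn.go ['$'] (f+1) ('$' :: rest) cur acc
              = PySem.Chars.splitOn.go ['$'] f rest [] (cur.reverse :: acc) by
            simp [PySem.Chars.splitOn.go, List.isPrefixOf]]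
        rw [ih f [] (cur.reverse :: acc) (by simpa using h)]
        simp [pvSplit]
      · rw [show PySem.Chars.splitOn.go ['$'] (f+1) (c :: rest) cur acc
              = PySem.Chars.splitOn.go ['$'] f rest (c :: cur) acc by
            simp only [PySem.Chars.splitOn.go, List.isPrefixOf]
            simp
            exact fun h => absurd h.symm hc]
        rw [ih f (c :: cur) acc (by simpa using h)]
        simp [pvSplit, hc]

theorem pv_splitOn_eq (l : List Char) : PySem.Chars.splitOn l ['$'] = pvSplit l [] := by
  have := pv_go_eq l (l.length + 1) [] [] (Nat.lt_succ_self _)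
  simpa [PySem.Chars.splitOn] using this

theorem pv_loop_eq (P : List Char) : ∀ (l : List Char) (n : Int) (aux : List Char),
    (if (l.foldl (pvStep P) (n, aux)).2 = P then (l.foldl (pvStep P) (n, aux)).1 + 1
     else (l.foldl (pvStep P) (n, aux)).1)
    = n + ((pvSplit l aux.reverse).count P : Int) := by
  intro l
  induction l with
  | nil =>
    intro n aux
    by_cases h : aux = P <;>
      simp [pvSplit, h]
  | cons c rest ih =>
    intro n aux
    rw [List.foldl_cons]
    by_cases hc : c = '$'
    · subst hc
      rw [show pvStep P (n, aux) '$' = (if aux = P then n + 1 else n, []) by simp [pvStep]]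
      rw [ih (if aux = P then n + 1 else n) []]
      by_cases h : aux = P <;>
        simp [pvSplit, h] <;> ring
    · rw [show pvStep P (n, aux) c = (n, aux ++ [c]) by simp [pvStep, hc]]
      rw [ih n (aux ++ [c])]
      simp [pvSplit, hc]

theorem pv_count_ofList (pieces : List (List Char)) (p : String) :
    (pieces.map String.ofList).count p = pieces.count p.toList := by
  induction pieces with
  | nil => simp
  | cons a rest ih =>
    have : (String.ofList a = p) ↔ (a = p.toList) := by
      constructor
      · rintro rfl; simp
      · rintro rfl; simp
    simp [List.count_cons, ih, this]

-- ===== VERDICT (by name: the statement is the Claim_ definition above) =====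
theorem votos_partido_spec : Claim_equal_votos_partido := by
  intro v p _
  unfold Spec_votos_partido votos_partido votos_partido_alt
  rw [show PySem.Str.split? v "$" = some ((pvSplit v.toList []).map String.ofList) by
    simp [PySem.Str.split?, PySem.Chars.split?, pv_splitOn_eq,
      show ("$" : String).toList = ['$'] from rfl]]
  simp only [Option.getD_some, pv_count_ofList]
  show (if (v.toList.foldl (pvStep p.toList) (0, [])).2 = p.toList
        then (v.toList.foldl (pvStep p.toList) (0, [])).1 + 1
        else (v.toList.foldl (pvStep p.toList) (0, [])).1)
       = ((pvSplit v.toList []).count p.toList : Int)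
  rw [pv_loop_eq p.toList v.toList 0 []]
  simp
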